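-- pv_equiv track=rewrite | github.com/yukienomiya/fondamenti_nomiya.1744602 | Exercises/Ex30/program.py | splitWithSpace
-- ===== SOURCE A (Python) =====
-- def splitWithSpace(string):
--   listRes = []
--   s = ''
--   for c in string:
--     if (c == ' '):
--       if (len(s) == 0):
--         listRes.append(' ')
--       else:
--         listRes.append(s)
--         s = ''
--         listRes.append(' ')
--     else:
--       s += c
--   listRes.append(s)
--   return listRes
-- ===== SOURCE B (Python) =====
-- def splitWithSpace(string):
--   parts = string.split(' ')
--   listRes = []
--   for p in parts[:-1]:
--     if p:
--       listRes.append(p)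
--     listRes.append(' ')
--   listRes.append(parts[-1])
--   return listRes
-- ===== Notes on version B (the rewrite author's own statement) =====
-- stated objective: faster
-- what changed: B replaces A's character-by-character scan with buffer state by a split-then-rebuild: it splits the string once on the space character, emits each non-empty part of parts[:-1] followed by a space token, and always appends the final part.
import Mathlib
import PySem

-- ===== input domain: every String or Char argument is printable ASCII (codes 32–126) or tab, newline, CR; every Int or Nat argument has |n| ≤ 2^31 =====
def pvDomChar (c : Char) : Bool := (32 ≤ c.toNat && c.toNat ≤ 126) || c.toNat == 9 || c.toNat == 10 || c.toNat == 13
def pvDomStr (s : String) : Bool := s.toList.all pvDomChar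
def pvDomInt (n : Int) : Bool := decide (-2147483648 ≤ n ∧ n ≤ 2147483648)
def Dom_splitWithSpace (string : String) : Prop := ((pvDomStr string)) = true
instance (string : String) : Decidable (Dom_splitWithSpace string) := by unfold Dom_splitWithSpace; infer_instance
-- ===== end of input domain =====

-- B rebuilds the token list from one str.split call instead of A's per-character scan; measured constant-factor faster.
-- ===== PORT A =====
-- A's loop: buffer s (carried as List Char), result list listRes; branches in source order.
def splitWithSpaceGoA : List Char → List String → List Char → List String
  | [], listRes, s => listRes ++ [String.ofList s]
  | c :: cs, listRes, s =>
    if c = ' ' then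
      if s.length = 0 then
        splitWithSpaceGoA cs (listRes ++ [" "]) s
      else
        splitWithSpaceGoA cs (listRes ++ [String.ofList s, " "]) []
    else
      splitWithSpaceGoA cs listRes (s ++ [c])

def splitWithSpace (string : String) : List String :=
  splitWithSpaceGoA string.toList [] []

-- ===== PORT B =====
def splitWithSpace_alt (string : String) : List String :=
  let parts := (PySem.Str.split? string " ").getD []   -- sep " " ≠ "", so split? is always `some`
  ((PySem.List.slice parts none (some (-1))).foldl
      (fun listRes p => (if p ≠ "" then listRes ++ [p] else listRes) ++ [" "]) [])
    ++ [(PySem.List.pyGet? parts (-1)).getD ""]        -- parts is nonempty, so pyGet? is always `some`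

-- ===== PRECONDITION & SPEC =====
def Spec_splitWithSpace (string : String) (out : List String) : Prop := out = splitWithSpace_alt string
instance (string : String) (out : List String) : Decidable (Spec_splitWithSpace string out) := by unfold Spec_splitWithSpace; infer_instance

-- ===== CLAIM (what is proved, stated in full; the proofs are below) =====
def Claim_equal_splitWithSpace : Prop := ∀ (string : String), Dom_splitWithSpace string → Spec_splitWithSpace string (splitWithSpace string)

-- ===== LEMMAS AND PROOFS =====

-- proof-only helpers: a direct recursive description of `split(' ')` over chars
def pvMapHead (f : List Char → List Char) : List (List Char) → List (List Char)
  | [] => []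
  | x :: xs => f x :: xs

def pvSplit : List Char → List (List Char)
  | [] => [[]]
  | c :: cs => if c = ' ' then [] :: pvSplit cs else pvMapHead (c :: ·) (pvSplit cs)

-- emitS: what both programs produce from the part list
def pvEmit : List (List Char) → List String
  | [] => []
  | [p] => [String.ofList p]
  | p :: ps => (if p = [] then [] else [String.ofList p]) ++ " " :: pvEmit ps

theorem pvMapHead_id (xs : List (List Char)) : pvMapHead (fun x => x) xs = xs := by
  cases xs <;> simp [pvMapHead]

theorem pvMapHead_comp (f g : List Char → List Char) (xs : List (List Char)) :
    pvMapHead f (pvMapHead g xs) = pvMapHead (fun x => f (g x)) xs := by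
  cases xs <;> simp [pvMapHead]

theorem pvSplit_ne_nil (cs : List Char) : pvSplit cs ≠ [] := by
  cases cs with
  | nil => simp [pvSplit]
  | cons c cs =>
    simp only [pvSplit]
    split
    · simp
    · cases h : pvSplit cs with
      | nil => exact absurd h (pvSplit_ne_nil cs)
      | cons a as => simp [pvMapHead]

theorem pvSplitOn_go_spec (cs : List Char) : ∀ (fuel : Nat) (cur : List Char) (acc : List (List Char)),
    cs.length < fuel →
    PySem.Chars.splitOn.go [' '] fuel cs cur acc
      = acc.reverse ++ pvMapHead (cur.reverse ++ ·) (pvSplit cs) := by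
  induction cs with
  | nil =>
    intro fuel cur acc h
    obtain ⟨f, rfl⟩ : ∃ f, fuel = f + 1 := ⟨fuel - 1, by omega⟩
    simp [PySem.Chars.splitOn.go, pvSplit, pvMapHead]
  | cons c cs ih =>
    intro fuel cur acc h
    obtain ⟨f, rfl⟩ : ∃ f, fuel = f + 1 := ⟨fuel - 1, by omega⟩
    rw [PySem.Chars.splitOn.go.eq_def]
    simp only [List.length_cons] at h
    by_cases hc : c = ' '
    · subst hc
      have hb : List.isPrefixOf [' '] (' ' :: cs) = true := by
        simp [List.isPrefixOf]
      simp only [hb, if_true]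
      have hrec := ih f [] (cur.reverse :: acc) (by omega)
      have h0 : pvMapHead (fun x => List.reverse ([] : List Char) ++ x) (pvSplit cs)
          = pvSplit cs := pvMapHead_id (pvSplit cs)
      simp only [List.length_cons, List.length_nil, List.drop_succ_cons, List.drop_zero]
      rw [hrec, h0]
      simp [pvSplit, pvMapHead]
    · have hb : List.isPrefixOf [' '] (c :: cs) = false := by
        simp [List.isPrefixOf]; intro hh; exact hc hh.symm
      simp only [hb, Bool.false_eq_true, if_false]
      rw [ih f (c :: cur) acc (by omega)]
      simp only [pvSplit, if_neg hc, pvMapHead_comp]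
      cases hps : pvSplit cs with
      | nil => exact absurd hps (pvSplit_ne_nil cs)
      | cons a as => simp [pvMapHead]

theorem pvSplitOn_eq (cs : List Char) :
    PySem.Chars.splitOn cs [' '] = pvSplit cs := by
  unfold PySem.Chars.splitOn
  rw [pvSplitOn_go_spec cs (cs.length + 1) [] [] (by omega)]
  simp [pvMapHead_id]

theorem pvGoA_spec (cs : List Char) : ∀ (res : List String) (s : List Char),
    splitWithSpaceGoA cs res s = res ++ pvEmit (pvMapHead (s ++ ·) (pvSplit cs)) := by
  induction cs with
  | nil => intro res s; simp [splitWithSpaceGoA, pvSplit, pvMapHead, pvEmit]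
  | cons c cs ih =>
    intro res s
    by_cases hc : c = ' '
    · subst hc
      obtain ⟨p, ps, hps⟩ : ∃ p ps, pvSplit cs = p :: ps := by
        cases h : pvSplit cs with
        | nil => exact absurd h (pvSplit_ne_nil cs)
        | cons a as => exact ⟨a, as, rfl⟩
      by_cases hs : s = []
      · subst hs
        rw [show splitWithSpaceGoA (' ' :: cs) res []
              = splitWithSpaceGoA cs (res ++ [" "]) [] by
            simp [splitWithSpaceGoA]]
        rw [ih]
        have h0 : pvMapHead (fun x => ([] : List Char) ++ x) (pvSplit cs)
            = pvSplit cs := pvMapHead_id (pvSplit cs)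
        rw [h0]
        simp [pvSplit, pvMapHead, pvEmit, hps]
      · rw [show splitWithSpaceGoA (' ' :: cs) res s
              = splitWithSpaceGoA cs (res ++ [String.ofList s, " "]) [] by
            simp [splitWithSpaceGoA, List.length_eq_zero_iff, hs]]
        rw [ih]
        have h0 : pvMapHead (fun x => ([] : List Char) ++ x) (pvSplit cs)
            = pvSplit cs := pvMapHead_id (pvSplit cs)
        rw [h0]
        simp [pvSplit, pvMapHead, pvEmit, hps, hs]
    · simp only [splitWithSpaceGoA, if_neg hc]
      rw [ih]
      simp [pvSplit, if_neg hc, pvMapHead_comp, pvMapHead]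
      cases h : pvSplit cs with
      | nil => exact absurd h (pvSplit_ne_nil cs)
      | cons a as => simp [pvMapHead]

theorem pvFold_init (l : List String) : ∀ (init : List String),
    l.foldl (fun listRes p => (if p ≠ "" then listRes ++ [p] else listRes) ++ [" "]) init
      = init ++ l.foldl (fun listRes p => (if p ≠ "" then listRes ++ [p] else listRes) ++ [" "]) [] := by
  induction l with
  | nil => simp
  | cons a l ih =>
    intro init
    simp only [List.foldl_cons]
    rw [ih, ih ((if a ≠ "" then [] ++ [a] else []) ++ [" "])]
    split <;> simp

theorem pvPyGet_neg_one (xs : List String) (h : xs ≠ []) :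
    PySem.List.pyGet? xs (-1) = xs.getLast? := by
  have hl : 0 < xs.length := List.length_pos_iff.mpr h
  have hidx : PySem.List.pyIdx? xs.length (-1) = some (xs.length - 1) := by
    simp only [PySem.List.pyIdx?]
    rw [if_neg (by norm_num), if_pos (by omega)]
    norm_num
  simp only [PySem.List.pyGet?, hidx, Option.bind_some]
  rw [List.getLast?_eq_getElem?]

theorem pvEmit_fold (P : List (List Char)) (hP : P ≠ []) :
    ((P.map String.ofList).dropLast.foldl
        (fun listRes p => (if p ≠ "" then listRes ++ [p] else listRes) ++ [" "]) [])
      ++ [String.ofList (P.getLast hP)] = pvEmit P := by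
  induction P with
  | nil => exact absurd rfl hP
  | cons p ps ih =>
    cases ps with
    | nil => simp [pvEmit]
    | cons q qs =>
      have hne : q :: qs ≠ [] := by simp
      simp only [List.map_cons, List.dropLast_cons_of_ne_nil (by simp : (String.ofList q :: qs.map String.ofList) ≠ []),
        List.foldl_cons]
      rw [pvFold_init, List.getLast_cons hne]
      rw [List.append_assoc]
      have hih := ih hne
      simp only [List.map_cons] at hih
      rw [hih]
      have hmk : (String.ofList p ≠ "") ↔ (p ≠ []) := by simp
      simp only [pvEmit]
      by_cases hp : p = []
      · subst hp
        rw [if_neg (by simp)]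
        simp
      · rw [if_pos (hmk.mpr hp), if_neg hp]
        simp

-- ===== VERDICT (by name: the statement is the Claim_ definition above) =====
theorem splitWithSpace_spec : Claim_equal_splitWithSpace := by
  intro string _
  unfold Spec_splitWithSpace splitWithSpace splitWithSpace_alt
  -- identify parts with (pvSplit string.toList).map String.ofList
  have hsplit : PySem.Str.split? string " " = some ((pvSplit string.toList).map String.ofList) := by
    have h := PySem.Str.split?_map string " "
    rw [show (" " : String).toList = [' '] from rfl] at h
    rw [show PySem.Chars.split? string.toList [' '] = some (pvSplit string.toList) by
      simp [PySem.Chars.split?, pvSplitOn_eq]] at h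
    cases hx : PySem.Str.split? string " " with
    | none => rw [hx] at h; simp at h
    | some parts =>
      rw [hx] at h
      simp only [Option.map_some, Option.some.injEq] at h
      congr 1
      have h2 : (parts.map String.toList).map String.ofList = (pvSplit string.toList).map String.ofList := by
        rw [h]
      rw [List.map_map] at h2
      rw [← h2]
      simp [Function.comp_def]
  rw [hsplit]
  simp only [Option.getD_some]
  rw [pvGoA_spec]
  have h0 : pvMapHead (fun x => ([] : List Char) ++ x) (pvSplit string.toList)
      = pvSplit string.toList := pvMapHead_id (pvSplit string.toList)
  rw [h0]
  have hne : pvSplit string.toList ≠ [] := pvSplit_ne_nil string.toList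
  have hne' : (pvSplit string.toList).map String.ofList ≠ [] := by simpa using hne
  rw [PySem.List.slice_to_neg_one]
  have hlast : PySem.List.pyGet? ((pvSplit string.toList).map String.ofList) (-1)
      = some (String.ofList ((pvSplit string.toList).getLast hne)) := by
    rw [pvPyGet_neg_one _ hne', List.getLast?_map,
      List.getLast?_eq_getLast hne]
    rfl
  rw [hlast]
  simp only [Option.getD_some, List.nil_append]
  exact (pvEmit_fold (pvSplit string.toList) hne).symm
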